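-- pv_equiv track=rewrite | github.com/FluCollab/FMED | .github/scripts/parse_issue_form.py | parse_issue_form
-- ===== SOURCE A (Python) =====
-- def parse_issue_form(body_text):
--     """
--     Parses a GitHub Issue Form body (Markdown) into a dictionary.
--
--     GitHub Issue Forms structure the body with markdown headers corresponding
--     to the field labels defined in the YAML template.
--     """
--     data = {}
--
--     # Split by lines and normalize line endings
--     lines = body_text.replace('\r\n', '\n').split('\n')
--
--     current_key = None
--     current_value = []
--
--     for line in lines:
--         line_stripped = line.strip()
--
--         # Check for headers (keys)
--         if line_stripped.startswith('### '):
--             # Save previous key-value pair if it exists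
--             if current_key:
--                 val = '\n'.join(current_value).strip()
--                 if val == "_No response_":
--                     val = None
--                 data[current_key] = val
--
--             # Start new key
--             current_key = line_stripped[4:].strip()
--             current_value = []
--         elif current_key:
--             # Append line to current value
--             current_value.append(line)
--
--     # Save the last item
--     if current_key:
--         val = '\n'.join(current_value).strip()
--         if val == "_No response_":
--             val = None
--         data[current_key] = val
--
--     return data
-- ===== SOURCE B (Python) =====
-- def parse_issue_form(body_text):
--     lines = body_text.replace('\r\n', '\n').split('\n')
--     data = {}
--     n = len(lines)
--     i = 0
--     while i < n:
--         if lines[i].strip().startswith('### '):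
--             # header found: scan forward to the end of its block, then slice it out
--             key = lines[i].strip()[4:].strip()
--             j = i + 1
--             while j < n and not lines[j].strip().startswith('### '):
--                 j += 1
--             if key:
--                 val = '\n'.join(lines[i + 1:j]).strip()
--                 data[key] = None if val == "_No response_" else val
--             i = j
--         else:
--             i += 1
--     return data
-- ===== Notes on version B (the rewrite author's own statement) =====
-- stated objective: alternative
-- what changed: Replaces A's line-by-line state machine (current_key/current_value accumulator with duplicated flush blocks) by a block-scan: at each header it scans forward to the next header and slices the whole block out at once, so there is no running state or flush logic at all.
import Mathlib
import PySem

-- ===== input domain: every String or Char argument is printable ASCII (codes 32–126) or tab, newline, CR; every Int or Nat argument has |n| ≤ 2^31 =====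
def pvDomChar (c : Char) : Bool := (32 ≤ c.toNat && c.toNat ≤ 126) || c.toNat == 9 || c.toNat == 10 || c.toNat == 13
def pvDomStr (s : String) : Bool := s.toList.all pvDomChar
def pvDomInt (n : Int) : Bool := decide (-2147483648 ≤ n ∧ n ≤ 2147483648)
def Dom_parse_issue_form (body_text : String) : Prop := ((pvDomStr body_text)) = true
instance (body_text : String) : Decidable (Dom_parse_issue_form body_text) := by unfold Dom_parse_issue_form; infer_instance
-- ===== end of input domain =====

-- B replaces A's line-by-line state machine by a block-scan (jump header-to-header and slice each block); same values.

-- ===== PORT A =====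
-- Python truthiness of current_key (None or "" is falsy)
def pvTruthy (ck : Option String) : Bool := ck.getD "" != ""

-- the (duplicated) save block of A: join, strip, map "_No response_" to None, store
def pvSaveA (data : PySem.Dict String (Option String)) (key : String) (value : List String) :
    PySem.Dict String (Option String) :=
  let val := PySem.Str.strip (PySem.Str.join "\n" value)
  if val = "_No response_" then data.insert key none else data.insert key (some val)

def pvLoopA : List String → PySem.Dict String (Option String) → Option String → List String →
    PySem.Dict String (Option String)
  | [], data, ck, cv => if pvTruthy ck then pvSaveA data (ck.getD "") cv else data
  | line :: rest, data, ck, cv =>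
    let ls := PySem.Str.strip line
    if PySem.Str.startswith ls "### " then
      pvLoopA rest (if pvTruthy ck then pvSaveA data (ck.getD "") cv else data)
        (some (PySem.Str.strip (PySem.Str.slice ls (some 4) none))) []
    else if pvTruthy ck then pvLoopA rest data ck (cv ++ [line])
    else pvLoopA rest data ck cv

def parse_issue_form (body_text : String) : List (String × Option String) :=
  (pvLoopA ((PySem.Str.split? (PySem.Str.replace body_text "\r\n" "\n") "\n").getD [])
    PySem.Dict.empty none []).items

-- ===== PORT B =====
-- lines[i].strip().startswith('### ')
def pvHeader (l : String) : Bool := PySem.Str.startswith (PySem.Str.strip l) "### "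

-- the inner `while j < n and not header: j += 1` plus the slice lines[i+1:j] / the rest lines[j:]
def pvSpanBody : List String → List String × List String
  | [] => ([], [])
  | l :: rest =>
    if pvHeader l then ([], l :: rest)
    else
      let p := pvSpanBody rest
      (l :: p.1, p.2)

theorem pvSpanBody_len (ls : List String) : (pvSpanBody ls).2.length ≤ ls.length := by
  induction ls with
  | nil => simp [pvSpanBody]
  | cons l rest ih =>
    simp only [pvSpanBody]
    split
    · simp
    · simpa using Nat.le_succ_of_le ih

-- join/strip/'_No response_' normalisation of a block
def pvNormB (raw : List String) : Option String :=
  let val := PySem.Str.strip (PySem.Str.join "\n" raw)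
  if val = "_No response_" then none else some val

-- the outer while over i, as recursion on the suffix lines[i:]
def pvLoopB : List String → PySem.Dict String (Option String) → PySem.Dict String (Option String)
  | [], d => d
  | l :: rest, d =>
    if pvHeader l then
      let key := PySem.Str.strip (PySem.Str.slice (PySem.Str.strip l) (some 4) none)
      let p := pvSpanBody rest
      pvLoopB p.2 (if key ≠ "" then d.insert key (pvNormB p.1) else d)
    else pvLoopB rest d
  termination_by ls _ => ls.length
  decreasing_by
  · exact Nat.lt_succ_of_le (pvSpanBody_len rest)
  · simp

def parse_issue_form_alt (body_text : String) : List (String × Option String) :=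
  (pvLoopB ((PySem.Str.split? (PySem.Str.replace body_text "\r\n" "\n") "\n").getD [])
    PySem.Dict.empty).items

-- ===== PRECONDITION & SPEC =====
def Spec_parse_issue_form (body_text : String) (out : List (String × Option String)) : Prop := out = parse_issue_form_alt body_text
instance (body_text : String) (out : List (String × Option String)) : Decidable (Spec_parse_issue_form body_text out) := by unfold Spec_parse_issue_form; infer_instance

-- ===== CLAIM (what is proved, stated in full; the proofs are below) =====
def Claim_equal_parse_issue_form : Prop := ∀ (body_text : String), Dom_parse_issue_form body_text → Spec_parse_issue_form body_text (parse_issue_form body_text)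

-- ===== LEMMAS AND PROOFS =====
theorem pvSaveA_eq (data : PySem.Dict String (Option String)) (k : String) (v : List String) :
    pvSaveA data k v = data.insert k (pvNormB v) := by
  simp only [pvSaveA, pvNormB]
  split <;> rfl

theorem pvSpanBody_header (l : String) (rest : List String) (h : pvHeader l = true) :
    pvSpanBody (l :: rest) = ([], l :: rest) := by
  simp [pvSpanBody, h]

theorem pvSpanBody_nonheader (l : String) (rest : List String) (h : pvHeader l = false) :
    pvSpanBody (l :: rest) = (l :: (pvSpanBody rest).1, (pvSpanBody rest).2) := by
  simp [pvSpanBody, h]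

theorem pvLoopB_header (l : String) (rest : List String)
    (d : PySem.Dict String (Option String)) (h : pvHeader l = true) :
    pvLoopB (l :: rest) d =
      pvLoopB (pvSpanBody rest).2
        (if PySem.Str.strip (PySem.Str.slice (PySem.Str.strip l) (some 4) none) ≠ "" then
          d.insert (PySem.Str.strip (PySem.Str.slice (PySem.Str.strip l) (some 4) none))
            (pvNormB (pvSpanBody rest).1)
        else d) := by
  rw [pvLoopB]
  simp [h]

theorem pvLoopB_nonheader (l : String) (rest : List String)
    (d : PySem.Dict String (Option String)) (h : pvHeader l = false) :
    pvLoopB (l :: rest) d = pvLoopB rest d := by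
  rw [pvLoopB]
  simp [h]

-- B's outer scan skips non-header prefixes just like the inner span does
theorem pvLoopB_skip (ls : List String) (d : PySem.Dict String (Option String)) :
    pvLoopB ls d = pvLoopB (pvSpanBody ls).2 d := by
  induction ls with
  | nil => rfl
  | cons l rest ih =>
    cases h : pvHeader l with
    | true => rw [pvSpanBody_header l rest h]
    | false => rw [pvSpanBody_nonheader l rest h, pvLoopB_nonheader l rest d h, ih]

theorem pvLoopA_header (l : String) (rest : List String)
    (d : PySem.Dict String (Option String)) (ck : Option String) (cv : List String)
    (h : pvHeader l = true) :
    pvLoopA (l :: rest) d ck cv =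
      pvLoopA rest (if pvTruthy ck then pvSaveA d (ck.getD "") cv else d)
        (some (PySem.Str.strip (PySem.Str.slice (PySem.Str.strip l) (some 4) none))) [] := by
  unfold pvHeader at h
  simp at h
  rw [pvLoopA]
  simp [h]

theorem pvLoopA_nonheader_keyed (l : String) (rest : List String)
    (d : PySem.Dict String (Option String)) (k : String) (cv : List String)
    (h : pvHeader l = false) (hk : k ≠ "") :
    pvLoopA (l :: rest) d (some k) cv = pvLoopA rest d (some k) (cv ++ [l]) := by
  unfold pvHeader at h
  simp at h
  rw [pvLoopA]
  simp [h, pvTruthy, hk]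

theorem pvLoopA_nonheader_falsy (l : String) (rest : List String)
    (d : PySem.Dict String (Option String)) (ck : Option String) (cv : List String)
    (h : pvHeader l = false) (hck : pvTruthy ck = false) :
    pvLoopA (l :: rest) d ck cv = pvLoopA rest d ck cv := by
  unfold pvHeader at h
  simp at h
  rw [pvLoopA]
  simp [h, hck]

-- the three states of A's walk expressed through B's block-scan
theorem pvLoopA_eq_loopB (lines : List String) :
    ∀ (d : PySem.Dict String (Option String)) (v : List String) (k : String),
      (k ≠ "" →
        pvLoopA lines d (some k) v =
          pvLoopB (pvSpanBody lines).2 (d.insert k (pvNormB (v ++ (pvSpanBody lines).1)))) ∧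
      pvLoopA lines d (some "") v = pvLoopB lines d ∧
      pvLoopA lines d none v = pvLoopB lines d := by
  induction lines with
  | nil =>
    intro d v k
    refine ⟨fun hk => ?_, ?_, ?_⟩
    · simp [pvLoopA, pvLoopB, pvSpanBody, pvTruthy, hk, pvSaveA_eq]
    · simp [pvLoopA, pvLoopB, pvTruthy]
    · simp [pvLoopA, pvLoopB, pvTruthy]
  | cons line rest ih =>
    intro d v k
    cases hh : pvHeader line with
    | true =>
      have step : ∀ d' : PySem.Dict String (Option String),
          pvLoopA rest d'
            (some (PySem.Str.strip (PySem.Str.slice (PySem.Str.strip line) (some 4) none))) [] =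
          pvLoopB (line :: rest) d' := by
        intro d'
        rw [pvLoopB_header line rest d' hh]
        by_cases hk2 :
            PySem.Str.strip (PySem.Str.slice (PySem.Str.strip line) (some 4) none) = ""
        · rw [hk2]
          simp only [ne_eq, not_true_eq_false, if_false]
          rw [(ih d' [] "").2.1, pvLoopB_skip]
        · rw [(ih d' [] _).1 hk2]
          simp [hk2]
      refine ⟨fun hk => ?_, ?_, ?_⟩
      · rw [pvSpanBody_header line rest hh, pvLoopA_header line rest d (some k) v hh]
        simp [pvTruthy, hk, pvSaveA_eq]
        exact step _
      · rw [pvLoopA_header line rest d (some "") v hh]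
        simp [pvTruthy]
        exact step d
      · rw [pvLoopA_header line rest d none v hh]
        simp [pvTruthy]
        exact step d
    | false =>
      refine ⟨fun hk => ?_, ?_, ?_⟩
      · rw [pvSpanBody_nonheader line rest hh, pvLoopA_nonheader_keyed line rest d k v hh hk,
          (ih d (v ++ [line]) k).1 hk]
        simp
      · rw [pvLoopA_nonheader_falsy line rest d (some "") v hh (by simp [pvTruthy]),
          pvLoopB_nonheader line rest d hh, (ih d v "").2.1]
      · rw [pvLoopA_nonheader_falsy line rest d none v hh (by simp [pvTruthy]),
          pvLoopB_nonheader line rest d hh, (ih d v "").2.2]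

-- ===== VERDICT (by name: the statement is the Claim_ definition above) =====
theorem parse_issue_form_spec : Claim_equal_parse_issue_form := by
  intro body_text _
  unfold Spec_parse_issue_form parse_issue_form parse_issue_form_alt
  rw [(pvLoopA_eq_loopB _ PySem.Dict.empty [] "").2.2]
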